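-- pv_equiv track=rewrite | github.com/v-monish/synopsis | testing/original_working_copy.py | remove_consecutive_short_lines
-- ===== SOURCE A (Python) =====
-- def remove_consecutive_short_lines(input_text: str, length: int) -> str:
--     lines = input_text.split('\n')
--     result_lines = []
--     short_count = 0
--     for line in lines:
--         if len(line) < 3:
--             continue
--         elif len(line) < length:
--             short_count += 1
--         else:
--             if short_count >= 3:
--                 del result_lines[-short_count:]
--             short_count = 0
--         result_lines.append(line)
--     if short_count >= 3:
--         del result_lines[-short_count:]
--         short_count = 0
--     return '\n'.join(result_lines)
-- ===== SOURCE B (Python) =====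
-- def remove_consecutive_short_lines(input_text: str, length: int) -> str:
--     # Two-stage: drop <3-char lines up front, then scan runs of consecutive
--     # short lines as groups, keeping only runs shorter than 3.
--     lines = [l for l in input_text.split('\n') if len(l) >= 3]
--     out = []
--     i = 0
--     while i < len(lines):
--         if len(lines[i]) >= length:
--             out.append(lines[i])
--             i += 1
--         else:
--             j = i + 1
--             while j < len(lines) and len(lines[j]) < length:
--                 j += 1
--             if j - i < 3:
--                 out.extend(lines[i:j])
--             i = j
--     return '\n'.join(out)
-- ===== Notes on version B (the rewrite author's own statement) =====
-- stated objective: alternative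
-- what changed: B first filters out the <3-char lines, then scans the remaining lines run-by-run (locating each maximal run of short lines and keeping it only if shorter than 3), instead of A's single pass with a counter and delete-negative-slice bookkeeping.
import Mathlib
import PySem

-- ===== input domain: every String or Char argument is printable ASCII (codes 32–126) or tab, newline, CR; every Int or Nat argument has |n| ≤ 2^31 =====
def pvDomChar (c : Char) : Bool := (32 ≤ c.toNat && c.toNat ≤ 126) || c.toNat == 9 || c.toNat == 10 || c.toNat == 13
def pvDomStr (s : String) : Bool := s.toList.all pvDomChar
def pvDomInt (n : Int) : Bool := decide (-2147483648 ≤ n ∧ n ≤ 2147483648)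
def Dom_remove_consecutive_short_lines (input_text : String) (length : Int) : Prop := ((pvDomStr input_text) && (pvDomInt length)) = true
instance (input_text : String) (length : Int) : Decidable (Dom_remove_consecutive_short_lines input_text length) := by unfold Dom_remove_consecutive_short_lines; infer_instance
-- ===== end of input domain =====

-- B filters the <3-char lines first and then scans maximal runs of short lines as groups,
-- instead of A's single pass with a counter and delete-negative-slice bookkeeping; same O(n) cost.
-- ===== PORT A =====
-- A's for-loop state: (result_lines, short_count); del result_lines[-k:] (k ≥ 3 > 0) is take (len - k)
def pvLoopA (length : Int) : List String → List String × Nat → List String × Nat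
  | [], s => s
  | l :: ls, (res, cnt) =>
    if PySem.Str.len l < 3 then pvLoopA length ls (res, cnt)
    else if PySem.Str.len l < length then pvLoopA length ls (res ++ [l], cnt + 1)
    else
      pvLoopA length ls ((if cnt ≥ 3 then res.take (res.length - cnt) else res) ++ [l], 0)

def remove_consecutive_short_lines (input_text : String) (length : Int) : String :=
  let lines := (PySem.Str.split? input_text "\n").getD []
  let (res, cnt) := pvLoopA length lines ([], 0)
  PySem.Str.join "\n" (if cnt ≥ 3 then res.take (res.length - cnt) else res)

-- ===== PORT B =====
-- B's run scan: the inner 'while j' loop locating the maximal run of short lines is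
-- takeWhile/dropWhile on the tail; lines[i:j] is the run itself.
def pvGroups (length : Int) : List String → List String
  | [] => []
  | l :: ls =>
    if PySem.Str.len l ≥ length then l :: pvGroups length ls
    else
      let run := l :: ls.takeWhile (fun x => decide (PySem.Str.len x < length))
      let rest := ls.dropWhile (fun x => decide (PySem.Str.len x < length))
      (if run.length < 3 then run else []) ++ pvGroups length rest
termination_by ls => ls.length
decreasing_by
  · simp only [List.length_cons]; omega
  · simp only [List.length_cons]
    have := List.length_dropWhile_le (fun x => decide (PySem.Str.len x < length)) ls
    omega

def remove_consecutive_short_lines_alt (input_text : String) (length : Int) : String :=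
  let lines := ((PySem.Str.split? input_text "\n").getD []).filter (fun l => decide (3 ≤ PySem.Str.len l))
  PySem.Str.join "\n" (pvGroups length lines)

-- ===== PRECONDITION & SPEC =====
def Spec_remove_consecutive_short_lines (input_text : String) (length : Int) (out : String) : Prop := out = remove_consecutive_short_lines_alt input_text length
instance (input_text : String) (length : Int) (out : String) : Decidable (Spec_remove_consecutive_short_lines input_text length out) := by unfold Spec_remove_consecutive_short_lines; infer_instance

-- ===== CLAIM (what is proved, stated in full; the proofs are below) =====
def Claim_equal_remove_consecutive_short_lines : Prop := ∀ (input_text : String) (length : Int), Dom_remove_consecutive_short_lines input_text length → Spec_remove_consecutive_short_lines input_text length (remove_consecutive_short_lines input_text length)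

-- ===== LEMMAS AND PROOFS =====
-- Proof-only intermediate loop: A's loop rephrased with an explicit pending buffer.
def pvLoopH (length : Int) : List String → List String × List String → List String × List String
  | [], s => s
  | l :: ls, (res, pend) =>
    if PySem.Str.len l < 3 then pvLoopH length ls (res, pend)
    else if PySem.Str.len l < length then pvLoopH length ls (res, pend ++ [l])
    else
      pvLoopH length ls ((if pend.length < 3 then res ++ pend else res) ++ [l], [])

-- A's result is H's result followed by the pending run; A's counter is the run's length.
lemma pvLoopAH (length : Int) (ls : List String) :
    ∀ (res pend : List String),
      (let (r, c) := pvLoopA length ls (res ++ pend, pend.length)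
       if c ≥ 3 then r.take (r.length - c) else r) =
      (let (r, p) := pvLoopH length ls (res, pend)
       if p.length < 3 then r ++ p else r) := by
  induction ls with
  | nil =>
    intro res pend
    simp only [pvLoopA, pvLoopH]
    by_cases h : pend.length ≥ 3
    · simp only [h, if_pos, List.length_append, Nat.add_sub_cancel, List.take_left]
      rw [if_neg (by omega)]
    · rw [if_neg h, if_pos (by omega)]
  | cons l ls ih =>
    intro res pend
    simp only [pvLoopA, pvLoopH]
    by_cases h1 : PySem.Str.len l < 3
    · simp only [if_pos h1]; exact ih res pend
    · simp only [if_neg h1]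
      by_cases h2 : PySem.Str.len l < length
      · simp only [if_pos h2]
        have := ih res (pend ++ [l])
        simpa [List.append_assoc] using this
      · simp only [if_neg h2]
        have := ih ((if pend.length < 3 then res ++ pend else res) ++ [l]) []
        by_cases h3 : pend.length ≥ 3
        · rw [if_pos h3] at *
          rw [if_neg (by omega : ¬ pend.length < 3)] at this ⊢
          simpa [List.length_append, Nat.add_sub_cancel, List.take_left] using this
        · rw [if_neg h3]
          rw [if_pos (by omega : pend.length < 3)] at this ⊢
          simpa using this

-- H ignores lines shorter than 3 characters, so it can run on the filtered list.
lemma pvLoopH_filter (length : Int) (ls : List String) :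
    ∀ s, pvLoopH length ls s =
      pvLoopH length (ls.filter (fun l => decide (3 ≤ PySem.Str.len l))) s := by
  induction ls with
  | nil => intro s; rfl
  | cons l ls ih =>
    intro s
    rcases s with ⟨res, pend⟩
    by_cases h1 : PySem.Str.len l < 3
    · rw [List.filter_cons_of_neg (by simpa using (by omega : ¬ (3 ≤ PySem.Str.len l)))]
      simp only [pvLoopH, if_pos h1]
      exact ih _
    · rw [List.filter_cons_of_pos (by simpa using (by omega : 3 ≤ PySem.Str.len l))]
      simp only [pvLoopH, if_neg h1]
      split <;> exact ih _

-- Unfolding lemma for pvGroups on a cons.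
lemma pvGroups_cons (length : Int) (l : String) (ls : List String) :
    pvGroups length (l :: ls) =
    if PySem.Str.len l ≥ length then l :: pvGroups length ls
    else
      (if (l :: ls.takeWhile (fun x => decide (PySem.Str.len x < length))).length < 3 then
         l :: ls.takeWhile (fun x => decide (PySem.Str.len x < length)) else []) ++
      pvGroups length (ls.dropWhile (fun x => decide (PySem.Str.len x < length))) := by
  rw [pvGroups]

-- With an empty pending buffer the run-scan form is exactly pvGroups.
lemma pvGroups_eta (length : Int) (ls : List String) :
    (if (ls.takeWhile (fun x => decide (PySem.Str.len x < length))).length < 3 then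
       ls.takeWhile (fun x => decide (PySem.Str.len x < length)) else []) ++
    pvGroups length (ls.dropWhile (fun x => decide (PySem.Str.len x < length))) =
    pvGroups length ls := by
  cases ls with
  | nil => simp [pvGroups]
  | cons l ls =>
    by_cases h : PySem.Str.len l < length
    · rw [List.takeWhile_cons_of_pos (by simpa using h),
          List.dropWhile_cons_of_pos (by simpa using h),
          pvGroups_cons length l ls,
          if_neg (show ¬ PySem.Str.len l ≥ length by omega)]
    · rw [List.takeWhile_cons_of_neg (by simpa using h),
          List.dropWhile_cons_of_neg (by simpa using h)]
      simp

-- Flushing H's final state: keep the pending run only if shorter than 3.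
def pvFlush (rp : List String × List String) : List String :=
  if rp.2.length < 3 then rp.1 ++ rp.2 else rp.1

-- On a list with no <3 lines, H's flushed result is res ++ the run-scan output,
-- where pend is the already-consumed prefix of the current run of short lines.
lemma pvLoopH_groups (length : Int) (ls : List String) :
    ∀ (res pend : List String), (∀ x ∈ ls, 3 ≤ PySem.Str.len x) →
      pvFlush (pvLoopH length ls (res, pend)) =
      res ++ ((if (pend ++ ls.takeWhile (fun x => decide (PySem.Str.len x < length))).length < 3 then
                 pend ++ ls.takeWhile (fun x => decide (PySem.Str.len x < length)) else []) ++
              pvGroups length (ls.dropWhile (fun x => decide (PySem.Str.len x < length)))) := by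
  induction ls with
  | nil =>
    intro res pend _
    simp only [pvLoopH, List.takeWhile_nil, List.dropWhile_nil, pvFlush, List.append_nil]
    split <;> simp [pvGroups]
  | cons l ls ih =>
    intro res pend hall
    have h3 : ¬ PySem.Str.len l < 3 := by
      have := hall l (by simp); omega
    simp only [pvLoopH, if_neg h3]
    by_cases h2 : PySem.Str.len l < length
    · simp only [if_pos h2]
      rw [List.takeWhile_cons_of_pos (by simpa using h2),
          List.dropWhile_cons_of_pos (by simpa using h2)]
      have := ih res (pend ++ [l]) (fun x hx => hall x (by simp [hx]))
      simpa [List.append_assoc] using this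
    · simp only [if_neg h2]
      rw [List.takeWhile_cons_of_neg (by simpa using h2),
          List.dropWhile_cons_of_neg (by simpa using h2)]
      rw [ih ((if pend.length < 3 then res ++ pend else res) ++ [l]) []
            (fun x hx => hall x (by simp [hx]))]
      simp only [List.append_nil, List.nil_append]
      rw [pvGroups_cons length l ls,
          if_pos (show PySem.Str.len l ≥ length by omega),
          ← pvGroups_eta length ls]
      by_cases h4 : pend.length < 3
      · rw [if_pos h4, if_pos h4]
        simp [List.append_assoc]
      · rw [if_neg h4, if_neg h4]
        simp [List.append_assoc]

-- ===== VERDICT (by name: the statement is the Claim_ definition above) =====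
theorem remove_consecutive_short_lines_spec : Claim_equal_remove_consecutive_short_lines := by
  intro input_text length _
  unfold Spec_remove_consecutive_short_lines
  unfold remove_consecutive_short_lines remove_consecutive_short_lines_alt
  set ls := (PySem.Str.split? input_text "\n").getD [] with hls
  have hAH := pvLoopAH length ls [] []
  simp only [List.length_nil, List.nil_append] at hAH
  rw [pvLoopH_filter] at hAH
  set fls := ls.filter (fun l => decide (3 ≤ PySem.Str.len l)) with hfls
  have hall : ∀ x ∈ fls, 3 ≤ PySem.Str.len x := by
    intro x hx
    have := List.of_mem_filter hx
    simpa using this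
  have hHG := pvLoopH_groups length fls [] [] hall
  simp only [List.nil_append] at hHG
  rw [pvGroups_eta] at hHG
  dsimp only
  rcases hA : pvLoopA length ls ([], 0) with ⟨rA, cA⟩
  rcases hB : pvLoopH length fls ([], []) with ⟨rB, pB⟩
  simp only [hA, hB, pvFlush] at hAH hHG
  simp only [hAH, hHG]
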